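-- pv_equiv track=rewrite | github.com/cotchan/algorithm | python/PROGRAMMERS/PG49189.py | solution
-- ===== SOURCE A (Python) =====
-- from collections import deque
--
-- def bfs(n, graph):
--
--     candidate = []
--     answer = 0
--     visited = [False for loop in range(n)]
--     visited[0] = True
--     q = deque()
--     q.append(0)
--
--     while len(q) != 0:
--         loop = len(q)
--
--         answer = loop
--         candidate.clear()
--
--         for i in range(loop):
--             now_node = q.popleft()
--
--             for nxt in graph[now_node]:
--                 if not(visited[nxt]):
--                     visited[nxt] = True
--                     q.append(nxt)
--                     candidate.append(nxt)
--
--     return answer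
--
-- def solution(n, edge):
--
--     # 2차원 리스트 선언
--     graph = [[] for loop in range(n)]
--
--     # init
--     for edgeInfo in edge:
--         src, dst = edgeInfo
--         src -= 1
--         dst -= 1
--         graph[src].append(dst)
--         graph[dst].append(src)
--
--     return bfs(n,graph)
-- ===== SOURCE B (Python) =====
-- from collections import deque
--
--
-- def solution(n, edge):
--     graph = [[] for _ in range(n)]
--     for pair in edge:
--         u = pair[0] - 1
--         v = pair[1] - 1
--         graph[u].append(v)
--         graph[v].append(u)
--
--     dist = [-1] * n
--     dist[0] = 0
--     queue = deque([(0, 0)])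
--     while queue:
--         node, d = queue.popleft()
--         for nb in graph[node]:
--             if dist[nb] < 0:
--                 dist[nb] = d + 1
--                 queue.append((nb, d + 1))
--
--     farthest = max(dist)
--     return dist.count(farthest)
-- ===== Notes on version B (the rewrite author's own statement) =====
-- stated objective: alternative
-- what changed: A runs a level-synchronous BFS (an inner per-level loop plus a running 'size of the last level' variable and a candidate buffer); B runs a flat one-node-at-a-time BFS that fills a distance table (queue entries carry their distance) and then obtains the answer by a separate max/count pass over that table.
import Mathlib
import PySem

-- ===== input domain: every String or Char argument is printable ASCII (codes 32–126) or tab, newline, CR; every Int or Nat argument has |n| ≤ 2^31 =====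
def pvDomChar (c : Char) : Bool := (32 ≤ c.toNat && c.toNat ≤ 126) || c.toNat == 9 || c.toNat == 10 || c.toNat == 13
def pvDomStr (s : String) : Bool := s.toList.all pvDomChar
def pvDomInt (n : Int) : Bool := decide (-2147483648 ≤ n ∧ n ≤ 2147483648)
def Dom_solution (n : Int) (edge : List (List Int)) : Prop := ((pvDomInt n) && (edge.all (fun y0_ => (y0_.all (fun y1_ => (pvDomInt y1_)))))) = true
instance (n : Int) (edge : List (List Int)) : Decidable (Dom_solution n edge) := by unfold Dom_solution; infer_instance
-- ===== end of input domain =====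

-- B replaces A's level-synchronous BFS (inner per-level loop, running level-size variable,
-- candidate buffer) by a flat one-node-at-a-time BFS whose queue entries carry their distance
-- and which fills a distance table, the answer being a separate max/count pass over that table
-- (objective: alternative decomposition, same asymptotic cost).
-- Both while-loops are ported with a fuel bound that only makes the recursion total; the fuel
-- passed by solution / solution_alt is proved sufficient (the zero-fuel arm is never reached
-- on inputs satisfying Pre_solution — see outer_sim and the final theorem).

-- ===== PORT A =====
-- Python-indexing helper: graph[i].append(x) with Python's negative-index rule
-- (the out-of-range case, IndexError in Python, is excluded by Pre_solution)
def pvAppendAt (g : List (List Int)) (i : Int) (x : Int) : List (List Int) :=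
  match PySem.List.pyGet? g i with
  | some l => PySem.List.pySetD g i (l ++ [x])
  | none => g

def addEdgeA (g : List (List Int)) (e : List Int) : List (List Int) :=
  match e with
  | [src, dst] => pvAppendAt (pvAppendAt g (src - 1) (dst - 1)) (dst - 1) (src - 1)
  | _ => g  -- Python raises on unpacking; excluded by Pre_solution

-- one neighbour of the inner 'for nxt in graph[now_node]' loop
def relaxA (st : List Bool × List Int × List Int) (nxt : Int) : List Bool × List Int × List Int :=
  match PySem.List.pyGet? st.1 nxt with
  | some b =>
      if b then st
      else (PySem.List.pySetD st.1 nxt true, st.2.1 ++ [nxt], st.2.2 ++ [nxt])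
  | none => st  -- IndexError in Python; excluded by Pre_solution

-- the inner 'for i in range(loop)' loop: pops each node of the current level in order
def levelA (g : List (List Int)) : List Int → List Bool × List Int × List Int → List Bool × List Int × List Int
  | [], st => st
  | now :: rest, st => levelA g rest (((PySem.List.pyGet? g now).getD []).foldl relaxA st)

-- the outer 'while len(q) != 0' loop (fuel = an upper bound on its iteration count)
def outerA (g : List (List Int)) : Nat → List Bool → List Int → Int → List Int → Int
  | 0, _, _, answer, _ => answer  -- fuel guard only; never reached with the fuel solution passes
  | fuel + 1, v, q, answer, _cand =>
      if q.length = 0 then answer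
      else
        outerA g fuel (levelA g q (v, [], [])).1 (levelA g q (v, [], [])).2.1
          (q.length : Int) (levelA g q (v, [], [])).2.2

def solution (n : Int) (edge : List (List Int)) : Int :=
  let graph := edge.foldl addEdgeA (List.replicate n.toNat [])
  let visited := PySem.List.pySetD (List.replicate n.toNat false) 0 true
  outerA graph (n.toNat + 1) visited [0] 0 []

-- ===== PORT B =====
-- graph[u].append(x): resolve the Python index (negative wrap), then replace that slot;
-- the out-of-range case (IndexError in Python) is excluded by Pre_solution
def pushEdge (g : List (List Int)) (i : Int) (x : Int) : List (List Int) :=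
  match PySem.List.pyIdx? g.length i with
  | some k => g.set k (g.getD k [] ++ [x])
  | none => g

-- the 'for pair in edge' loop of Source B (pair[0]/pair[1] on a short pair is an
-- IndexError in Python; excluded by Pre_solution)
def buildGraph (g : List (List Int)) : List (List Int) → List (List Int)
  | [] => g
  | pair :: rest =>
      match PySem.List.pyGet? pair 0, PySem.List.pyGet? pair 1 with
      | some u1, some v1 =>
          buildGraph (pushEdge (pushEdge g (u1 - 1) (v1 - 1)) (v1 - 1) (u1 - 1)) rest
      | _, _ => buildGraph g rest

-- the 'for nb in graph[node]' body: write d+1 into each still-negative slot and queue it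
-- (an out-of-range nb would be an IndexError in Python; excluded by Pre_solution)
def visitB (d : Nat) (dist : List Int) (pend : List (Int × Nat)) :
    List Int → List Int × List (Int × Nat)
  | [] => (dist, pend)
  | nb :: nbs =>
      match PySem.List.pyIdx? dist.length nb with
      | some k =>
          if dist.getD k 0 < 0 then
            visitB d (dist.set k ((d : Int) + 1)) (pend ++ [(nb, d + 1)]) nbs
          else visitB d dist pend nbs
      | none => visitB d dist pend nbs

-- Source B's flat 'while queue' loop: one popped node per iteration, distance rides in the
-- queue (fuel = an upper bound on the number of pops)
def loopB (g : List (List Int)) : Nat → List Int → List (Int × Nat) → List Int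
  | 0, dist, _ => dist  -- fuel guard only; never reached with the fuel solution_alt passes
  | _ + 1, dist, [] => dist
  | fuel + 1, dist, (node, d) :: rest =>
      loopB g fuel (visitB d dist rest ((PySem.List.pyGet? g node).getD [])).1
        (visitB d dist rest ((PySem.List.pyGet? g node).getD [])).2

def solution_alt (n : Int) (edge : List (List Int)) : Int :=
  let graph := buildGraph (List.replicate n.toNat []) edge
  -- dist = [-1] * n; dist[0] = 0 (an IndexError for n ≤ 0; excluded by Pre_solution)
  let dist := loopB graph (n.toNat + 1) ((List.replicate n.toNat (-1 : Int)).set 0 0) [(0, 0)]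
  -- max(dist) raises on an empty list (n ≤ 0); excluded by Pre_solution
  ((dist.count ((PySem.List.max? dist (fun x => x)).getD 0) : Nat) : Int)

-- ===== PRECONDITION & SPEC =====
-- Pre_ excludes exactly the inputs where Python A raises: n ≤ 0 (visited[0] = True is an
-- IndexError), an edge that is not a pair (unpacking raises), or an endpoint x with
-- x - 1 outside Python's index range [-n, n) for the n adjacency lists (IndexError).
def Pre_solution (n : Int) (edge : List (List Int)) : Prop :=
  1 ≤ n ∧ ∀ e ∈ edge, e.length = 2 ∧ ∀ x ∈ e, 1 - n ≤ x ∧ x ≤ n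
instance (n : Int) (edge : List (List Int)) : Decidable (Pre_solution n edge) := by
  unfold Pre_solution; infer_instance

def pvWitness_solution : Int × List (List Int) := (3, [[1, 2], [2, 3]])

def Spec_solution (n : Int) (edge : List (List Int)) (out : Int) : Prop := out = solution_alt n edge
instance (n : Int) (edge : List (List Int)) (out : Int) : Decidable (Spec_solution n edge out) := by
  unfold Spec_solution; infer_instance

-- ===== CLAIM (what is proved, stated in full; the proofs are below) =====
def Claim_equal_solution : Prop := ∀ (n : Int) (edge : List (List Int)), Dom_solution n edge → Pre_solution n edge → Spec_solution n edge (solution n edge)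

-- ===== LEMMAS AND PROOFS =====

theorem pyIdx?_lt {n : Nat} {i : Int} {k : Nat} (h : PySem.List.pyIdx? n i = some k) : k < n := by
  unfold PySem.List.pyIdx? at h
  split_ifs at h <;> simp_all <;> omega

theorem pySetD_idx {α : Type} (xs : List α) (i : Int) (v : α) {k : Nat}
    (hk : PySem.List.pyIdx? xs.length i = some k) :
    PySem.List.pySetD xs i v = xs.set k v := by
  simp [PySem.List.pySetD, PySem.List.pySet?, hk]

theorem pushEdge_eq (g : List (List Int)) (i : Int) (x : Int) :
    pushEdge g i x = pvAppendAt g i x := by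
  unfold pushEdge pvAppendAt
  cases hk : PySem.List.pyIdx? g.length i with
  | none => simp [PySem.List.pyGet?, hk]
  | some k =>
      have hlt := pyIdx?_lt hk
      rw [show PySem.List.pyGet? g i = some g[k] by
        simp [PySem.List.pyGet?, hk, List.getElem?_eq_getElem hlt]]
      dsimp only
      rw [pySetD_idx g i _ hk, List.getD_eq_getElem g [] hlt]

theorem buildGraph_eq (L : List (List Int)) :
    ∀ g : List (List Int), (∀ e ∈ L, e.length = 2) → buildGraph g L = L.foldl addEdgeA g := by
  induction L with
  | nil => intro g _; rfl
  | cons e rest ih =>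
      intro g hlen
      have h2 := (hlen e (List.mem_cons_self ..))
      obtain ⟨a, b, rfl⟩ : ∃ a b : Int, e = [a, b] := by
        match e, h2 with
        | [a, b], _ => exact ⟨a, b, rfl⟩
      rw [show buildGraph g ([a, b] :: rest)
            = buildGraph (pushEdge (pushEdge g (a - 1) (b - 1)) (b - 1) (a - 1)) rest from rfl]
      rw [ih _ (fun e he => hlen e (List.mem_cons_of_mem _ he))]
      simp [pushEdge_eq, addEdgeA]

-- loopB stops on an empty queue whatever fuel is left
theorem loopB_nil (g : List (List Int)) (f : Nat) (dist : List Int) :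
    loopB g f dist [] = dist := by
  cases f <;> rfl

-- visited[k] is true in A exactly when dist[k] has been assigned (≠ -1) in B,
-- and every dist entry is ≥ -1 (so B's sign test 'dist[nb] < 0' means 'dist[nb] = -1')
def VDRel (v : List Bool) (D : List Int) : Prop :=
  v.length = D.length ∧ ∀ k : Nat, k < D.length →
    ((v.getD k false = true ↔ D.getD k 0 ≠ -1) ∧ -1 ≤ D.getD k 0)

theorem VDRel_set {v : List Bool} {D : List Int} {k : Nat} (d : Nat)
    (hRel : VDRel v D) (hk : k < D.length) :
    VDRel (v.set k true) (D.set k ((d : Int) + 1)) := by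
  obtain ⟨hlen, hpt⟩ := hRel
  constructor
  · simp [hlen]
  · intro j hj
    rw [List.length_set] at hj
    have hjv : j < v.length := hlen ▸ hj
    rw [List.getD_eq_getElem _ _ (by simpa using hjv), List.getD_eq_getElem _ _ (by simpa using hj),
      List.getElem_set, List.getElem_set]
    by_cases hkj : k = j
    · simp [hkj]; omega
    · simp only [if_neg hkj]
      rw [← List.getD_eq_getElem _ false hjv, ← List.getD_eq_getElem _ 0 hj]
      exact hpt j hj

-- the neighbour loop, run in lockstep: A appends the new nodes w to queue and candidate,
-- B writes d+1 into their dist slots and queues them at distance d+1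
theorem visit_sim (d : Nat) (ns : List Int) :
    ∀ (v : List Bool) (D : List Int) (qa c : List Int) (qb : List (Int × Nat)),
      VDRel v D →
      ∃ (v' : List Bool) (D' : List Int) (w : List Int),
        ns.foldl relaxA (v, qa, c) = (v', qa ++ w, c ++ w) ∧
        visitB d D qb ns = (D', qb ++ w.map (fun x => (x, d + 1))) ∧
        VDRel v' D' ∧
        D'.count ((d : Int) + 1) = D.count ((d : Int) + 1) + w.length ∧
        (∀ x : Int, x ≠ (d : Int) + 1 → x ≠ -1 → D'.count x = D.count x) ∧
        D.count (-1) = D'.count (-1) + w.length ∧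
        (∀ y ∈ D', y ∈ D ∨ y = (d : Int) + 1) := by
  induction ns with
  | nil =>
      intro v D qa c qb hRel
      exact ⟨v, D, [], by simp, by simp [visitB], hRel, by simp, fun x _ _ => rfl, by simp,
        fun y hy => Or.inl hy⟩
  | cons nxt ns ih =>
      intro v D qa c qb hRel
      have hlen := hRel.1
      simp only [List.foldl_cons]
      rw [visitB]
      cases hk : PySem.List.pyIdx? D.length nxt with
      | none =>
          have hgA : PySem.List.pyGet? v nxt = none := by
            simp [PySem.List.pyGet?, hlen, hk]
          rw [show relaxA (v, qa, c) nxt = (v, qa, c) by simp [relaxA, hgA]]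
          exact ih v D qa c qb hRel
      | some k =>
          dsimp only
          have hkD : k < D.length := pyIdx?_lt hk
          have hkv : k < v.length := by omega
          have hgA : PySem.List.pyGet? v nxt = some v[k] := by
            simp [PySem.List.pyGet?, hlen, hk, List.getElem?_eq_getElem hkv]
          obtain ⟨hiff, hge⟩ := hRel.2 k hkD
          rw [List.getD_eq_getElem _ _ hkv] at hiff
          by_cases hD : D.getD k 0 = -1
          · have hD' : D[k] = -1 := by rwa [List.getD_eq_getElem _ _ hkD] at hD
            have hv : v[k] = false := by
              have hne : ¬ v[k] = true := fun h => (hiff.mp h) hD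
              rwa [Bool.not_eq_true] at hne
            have hsetA : PySem.List.pySetD v nxt true = v.set k true :=
              pySetD_idx v nxt true (by rw [hlen]; exact hk)
            rw [show relaxA (v, qa, c) nxt = (v.set k true, qa ++ [nxt], c ++ [nxt]) by
              simp only [relaxA, hgA, hv]; rw [if_neg Bool.false_ne_true, hsetA]]
            rw [if_pos (by rw [hD]; omega)]
            have hRel1 := VDRel_set d hRel hkD
            have hM1 : (D.set k ((d : Int) + 1)).count ((d : Int) + 1)
                = D.count ((d : Int) + 1) + 1 := by
              rw [List.count_set hkD]
              simp [hD', show ¬((-1 : Int) = (d : Int) + 1) by omega]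
            have hM2 : ∀ x : Int, x ≠ (d : Int) + 1 → x ≠ -1 →
                (D.set k ((d : Int) + 1)).count x = D.count x := by
              intro x hx1 hx2
              rw [List.count_set hkD]
              simp [hD', show ¬((-1 : Int) = x) from fun h => hx2 h.symm,
                show ¬((d : Int) + 1 = x) from fun h => hx1 h.symm]
            have hMneg : (D.set k ((d : Int) + 1)).count (-1) + 1 = D.count (-1) := by
              have hpos : 0 < D.count (-1) :=
                List.count_pos_iff.mpr (hD' ▸ List.getElem_mem hkD)
              rw [List.count_set hkD]
              simp [hD', show ¬((d : Int) + 1 = -1) by omega]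
              omega
            have hMmem : ∀ y ∈ D.set k ((d : Int) + 1), y ∈ D ∨ y = (d : Int) + 1 := by
              intro y hy
              rcases List.mem_or_eq_of_mem_set hy with h | h
              · exact Or.inl h
              · exact Or.inr h
            obtain ⟨v', D', w', eA, eB, hRel', c1, c2, cneg, m1⟩ :=
              ih (v.set k true) (D.set k ((d : Int) + 1)) (qa ++ [nxt]) (c ++ [nxt])
                (qb ++ [(nxt, d + 1)]) hRel1
            refine ⟨v', D', nxt :: w', ?_, ?_, hRel', ?_, ?_, ?_, ?_⟩
            · rw [eA]; simp
            · rw [eB]; simp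
            · rw [c1, hM1]; simp; omega
            · intro x hx1 hx2; rw [c2 x hx1 hx2, hM2 x hx1 hx2]
            · rw [← hMneg, cneg]; simp; omega
            · intro y hy
              rcases m1 y hy with h | h
              · exact hMmem y h
              · exact Or.inr h
          · have hv : v[k] = true := hiff.mpr hD
            rw [show relaxA (v, qa, c) nxt = (v, qa, c) by simp [relaxA, hgA, hv]]
            rw [if_neg (by omega)]
            exact ih v D qa c qb hRel

-- A's processing of one full level L (queue snapshot) against B's flat queue:
-- B pops exactly L.length entries, consuming exactly that much fuel
theorem level_sim (g : List (List Int)) (d : Nat) (L : List Int) :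
    ∀ (v : List Bool) (D : List Int) (qa c : List Int) (f : Nat),
      VDRel v D →
      ∃ (v' : List Bool) (D' : List Int) (w : List Int),
        levelA g L (v, qa, c) = (v', qa ++ w, c ++ w) ∧
        loopB g (f + L.length) D (L.map (fun x => (x, d)) ++ qa.map (fun x => (x, d + 1)))
          = loopB g f D' ((qa ++ w).map (fun x => (x, d + 1))) ∧
        VDRel v' D' ∧
        D'.count ((d : Int) + 1) = D.count ((d : Int) + 1) + w.length ∧
        (∀ x : Int, x ≠ (d : Int) + 1 → x ≠ -1 → D'.count x = D.count x) ∧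
        D.count (-1) = D'.count (-1) + w.length ∧
        (∀ y ∈ D', y ∈ D ∨ y = (d : Int) + 1) := by
  induction L with
  | nil =>
      intro v D qa c f hRel
      exact ⟨v, D, [], by simp [levelA], by simp, hRel, by simp, fun x _ _ => rfl, by simp,
        fun y hy => Or.inl hy⟩
  | cons now rest ih =>
      intro v D qa c f hRel
      obtain ⟨v1, D1, w1, eA, eB, hRel1, c1, c2, cneg, m1⟩ :=
        visit_sim d ((PySem.List.pyGet? g now).getD []) v D qa c
          (rest.map (fun x => (x, d)) ++ qa.map (fun x => (x, d + 1))) hRel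
      obtain ⟨v', D', w2, eA2, eB2, hRel', c1', c2', cneg', m1'⟩ :=
        ih v1 D1 (qa ++ w1) (c ++ w1) f hRel1
      refine ⟨v', D', w1 ++ w2, ?_, ?_, hRel', ?_, ?_, ?_, ?_⟩
      · show levelA g rest (((PySem.List.pyGet? g now).getD []).foldl relaxA (v, qa, c)) = _
        rw [eA, eA2]
        simp
      · have hstep : loopB g (f + (now :: rest).length) D
              ((now :: rest).map (fun x => (x, d)) ++ qa.map (fun x => (x, d + 1)))
            = loopB g (f + rest.length) D1
              (rest.map (fun x => (x, d)) ++ (qa ++ w1).map (fun x => (x, d + 1))) := by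
          rw [show f + (now :: rest).length = (f + rest.length) + 1 by simp; omega]
          simp only [List.map_cons, List.cons_append]
          rw [loopB, eB]
          simp [List.append_assoc]
        rw [hstep, eB2]
        simp
      · rw [c1', c1]
        simp
        omega
      · intro x hx1 hx2
        rw [c2' x hx1 hx2, c2 x hx1 hx2]
      · rw [cneg, cneg']
        simp
        omega
      · intro y hy
        rcases m1' y hy with h | h
        · exact m1 y h
        · exact Or.inr h

-- the two while-loops agree whenever both get enough fuel (≥ unvisited nodes + queue length)
theorem outer_sim (N : Nat) :
    ∀ (g : List (List Int)) (v : List Bool) (q : List Int) (ans : Int) (c : List Int)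
      (D : List Int) (d : Nat) (fB : Nat),
      VDRel v D → (∀ y ∈ D, y ≤ (d : Int)) →
      D.count (d : Int) = q.length → q ≠ [] →
      D.count (-1) + q.length ≤ N → D.count (-1) + q.length ≤ fB →
      outerA g N v q ans c =
        (((loopB g fB D (q.map (fun x => (x, d)))).count
          ((PySem.List.max? (loopB g fB D (q.map (fun x => (x, d)))) (fun x => x)).getD 0) : Nat) : Int) := by
  induction N with
  | zero =>
      intro g v q ans c D d fB hRel hbound hcount hq hN hfB
      have : 0 < q.length := List.length_pos_iff.mpr hq
      omega
  | succ N ih =>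
      intro g v q ans c D d fB hRel hbound hcount hq hN hfB
      have hql : 0 < q.length := List.length_pos_iff.mpr hq
      obtain ⟨f, hf⟩ : ∃ f, fB = f + q.length := ⟨fB - q.length, by omega⟩
      obtain ⟨v', D', w, eA, eB, hRel', c1, c2, cneg, m1⟩ := level_sim g d q v D [] [] f hRel
      have hcnt0 : D.count ((d : Int) + 1) = 0 := by
        rw [List.count_eq_zero]
        intro hmem
        have := hbound _ hmem
        omega
      have hc1 : D'.count ((d : Int) + 1) = w.length := by rw [c1, hcnt0]; omega
      have hcD : D'.count (d : Int) = q.length := by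
        rw [c2 (d : Int) (by omega) (by omega)]; exact hcount
      have heB : loopB g fB D (q.map (fun x => (x, d))) = loopB g f D' (w.map (fun x => (x, d + 1))) := by
        rw [hf]
        have h := eB
        simp only [List.map_nil, List.append_nil, List.nil_append] at h
        exact h
      rw [outerA, if_neg (by omega), eA]
      simp only [List.nil_append]
      by_cases hw : w = []
      · subst hw
        rw [show outerA g N v' [] ((q.length : Nat) : Int) [] = ((q.length : Nat) : Int) from by
          cases N <;> simp [outerA]]
        rw [heB]
        simp only [List.map_nil]
        rw [loopB_nil]
        have hdmem : (d : Int) ∈ D' := List.count_pos_iff.mp (by omega)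
        have hd1notin : ((d : Int) + 1) ∉ D' := by
          rw [← List.count_eq_zero]
          simpa using hc1
        have hball : ∀ y ∈ D', y ≤ (d : Int) := by
          intro y hy
          rcases m1 y hy with h | h
          · exact hbound y h
          · exact absurd (h ▸ hy) hd1notin
        obtain ⟨mx, hmx⟩ : ∃ mx, PySem.List.max? D' (fun x => x) = some mx := by
          cases hm : PySem.List.max? D' (fun x => x) with
          | none =>
              have : D' = [] := (PySem.List.max?_eq_none_iff D' (fun x => x)).mp hm
              rw [this] at hdmem
              simp at hdmem
          | some mx => exact ⟨mx, rfl⟩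
        have hmxd : mx = (d : Int) :=
          le_antisymm (hball mx (PySem.List.max?_mem hmx)) (PySem.List.max?_isMax hmx _ hdmem)
        rw [hmx, hmxd]
        simp [hcD]
      · have hwl : 0 < w.length := List.length_pos_iff.mpr hw
        have hbound' : ∀ y ∈ D', y ≤ (((d + 1 : Nat)) : Int) := by
          intro y hy
          rcases m1 y hy with h | h
          · have := hbound y h; push_cast; omega
          · push_cast; omega
        have hc1' : D'.count (((d + 1 : Nat)) : Int) = w.length := by push_cast; exact hc1
        have := ih g v' w (q.length : Int) w D' (d + 1) f hRel' hbound' hc1' hw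
          (by omega) (by omega)
        rw [this, heB]

-- ===== VERDICT (by name: the statement is the Claim_ definition above) =====
theorem solution_spec : Claim_equal_solution := by
  intro n edge hdom hpre
  obtain ⟨hn, hedge⟩ := hpre
  unfold Spec_solution solution solution_alt
  obtain ⟨m, hm⟩ : ∃ m, n.toNat = m + 1 := ⟨n.toNat - 1, by omega⟩
  have hgraph : buildGraph (List.replicate n.toNat []) edge =
      edge.foldl addEdgeA (List.replicate n.toNat []) :=
    buildGraph_eq edge _ (fun e he => (hedge e he).1)
  have hv0 : PySem.List.pySetD (List.replicate n.toNat false) 0 true =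
      true :: List.replicate m false := by
    rw [hm, List.replicate_succ]
    simp [PySem.List.pySetD, PySem.List.pySet?, PySem.List.pyIdx?]
  have hD0 : (List.replicate n.toNat (-1 : Int)).set 0 0 =
      (0 : Int) :: List.replicate m (-1 : Int) := by
    rw [hm, List.replicate_succ]
    simp
  have hRel0 : VDRel (true :: List.replicate m false) ((0 : Int) :: List.replicate m (-1 : Int)) := by
    constructor
    · simp
    · intro k hk
      cases k with
      | zero => simp
      | succ k =>
          simp at hk
          simp [List.getD, List.getElem?_eq_getElem (by simpa using hk :
            k < (List.replicate m (-1 : Int)).length), List.getElem?_eq_getElem (by simpa using hk :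
            k < (List.replicate m false).length)]
  have hbound0 : ∀ y ∈ (0 : Int) :: List.replicate m (-1 : Int), y ≤ ((0 : Nat) : Int) := by
    intro y hy
    rcases List.mem_cons.mp hy with h | h
    · simp [h]
    · have := List.eq_of_mem_replicate h
      simp [this]
  have hcount0 : ((0 : Int) :: List.replicate m (-1 : Int)).count ((0 : Nat) : Int) =
      ([0] : List Int).length := by
    simp [List.count_replicate]
  have hneg0 : ((0 : Int) :: List.replicate m (-1 : Int)).count (-1) = m := by
    simp
  have hmain := outer_sim (n.toNat + 1)
    (edge.foldl addEdgeA (List.replicate n.toNat [])) (true :: List.replicate m false)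
    [0] 0 [] ((0 : Int) :: List.replicate m (-1 : Int)) 0 (n.toNat + 1)
    hRel0 hbound0 hcount0 (by simp) (by rw [hneg0]; simp; omega) (by rw [hneg0]; simp; omega)
  simp only [List.map_cons, List.map_nil] at hmain
  rw [hgraph, hv0, hD0]
  exact hmain
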